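-- pv_equiv track=rewrite | github.com/Jvitormx/AdventOfCode_Study | DayTwo/one.py | createNewMatrix
-- ===== SOURCE A (Python) =====
-- def createNewMatrix(lines):
--      sortedLines = []
--
--      for i in range(len(lines)):
--         newLines = lines[i].replace(' ', '')
--         lineInLines = []
--
--         for j in range(len(newLines)):
--             lineInLines.append(int(newLines[j]))
--
--         if verifyOrder(lineInLines):
--             lineInLines.sort()
--             sortedLines.append(lineInLines)
--
--      return sortedLines
--
-- def verifyOrder(lineInLines):
--     if (all(lineInLines[i] <= lineInLines[i + 1] for i in range(len(lineInLines) - 1))) or (all(lineInLines[i] >= lineInLines[i + 1] for i in range(len(lineInLines) - 1))):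
--         return True
--     else:
--         return False
-- ===== SOURCE B (Python) =====
-- def createNewMatrix(lines):
--     result = []
--     for line in lines:
--         nums = [int(ch) for ch in line if ch != ' ']
--         if all(a <= b for a, b in zip(nums, nums[1:])):
--             result.append(nums)
--         elif all(a >= b for a, b in zip(nums, nums[1:])):
--             result.append(nums[::-1])
--     return result
-- ===== Notes on version B (the rewrite author's own statement) =====
-- stated objective: alternative
-- what changed: B replaces A's two index-based all() scans plus an unconditional sort with a single filtered comprehension and a keep-or-reverse decision: a non-decreasing line is appended as-is and a non-increasing one is appended reversed, so the sort disappears entirely.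
import Mathlib
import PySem

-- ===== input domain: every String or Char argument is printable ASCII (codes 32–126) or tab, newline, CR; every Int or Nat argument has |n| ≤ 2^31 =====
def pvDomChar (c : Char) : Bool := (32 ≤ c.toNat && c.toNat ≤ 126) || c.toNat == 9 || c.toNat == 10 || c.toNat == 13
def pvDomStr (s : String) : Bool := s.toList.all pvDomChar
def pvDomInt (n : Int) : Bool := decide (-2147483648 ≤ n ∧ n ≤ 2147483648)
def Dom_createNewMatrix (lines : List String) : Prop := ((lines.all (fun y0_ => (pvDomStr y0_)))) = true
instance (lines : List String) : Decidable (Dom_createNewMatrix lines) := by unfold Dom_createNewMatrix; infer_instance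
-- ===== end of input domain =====

-- B drops A's per-line sort: a monotone line is already sorted (keep it) or reverse-sorted (reverse it); alternative decomposition, same per-line work otherwise.


-- ===== PORT A =====
def verifyOrder (lineInLines : List Int) : Bool :=
  if ((List.range (lineInLines.length - 1)).all fun i =>
        decide (lineInLines.getD i 0 ≤ lineInLines.getD (i + 1) 0)) ||
     ((List.range (lineInLines.length - 1)).all fun i =>
        decide (lineInLines.getD i 0 ≥ lineInLines.getD (i + 1) 0)) then true else false

def createNewMatrix (lines : List String) : List (List Int) :=
  lines.foldl (fun sortedLines line =>
    let newLines := PySem.Str.replace line " " ""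
    -- int(newLines[j]): under Pre_ every remaining char is a digit, so ofChars? is some (getD 0 is never used)
    let lineInLines := newLines.toList.foldl (fun a c => a ++ [(PySem.Int.ofChars? [c]).getD 0]) []
    if verifyOrder lineInLines then sortedLines ++ [PySem.List.sorted lineInLines (fun x => x) false]
    else sortedLines) []

-- ===== PORT B =====
def createNewMatrix_alt (lines : List String) : List (List Int) :=
  lines.foldl (fun result line =>
    -- int(ch): under Pre_ every non-space char is a digit, so ofChars? is some (getD 0 is never used)
    let nums := (line.toList.filter (fun ch => ch != ' ')).map (fun ch => (PySem.Int.ofChars? [ch]).getD 0)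
    if (nums.zip (nums.drop 1)).all (fun p => decide (p.1 ≤ p.2)) then result ++ [nums]
    else if (nums.zip (nums.drop 1)).all (fun p => decide (p.1 ≥ p.2)) then result ++ [nums.reverse]
    else result) []

-- ===== PRECONDITION & SPEC =====
-- Pre_ excludes lines containing a non-space non-digit character, on which A's int(...) raises ValueError.
def Pre_createNewMatrix (lines : List String) : Prop :=
  (lines.all fun s => s.toList.all fun c => c == ' ' || c.isDigit) = true
instance (lines : List String) : Decidable (Pre_createNewMatrix lines) := by
  unfold Pre_createNewMatrix; infer_instance
def pvWitness_createNewMatrix : List String := ["1 2 3", "321", "13 2"]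

def Spec_createNewMatrix (lines : List String) (out : List (List Int)) : Prop := out = createNewMatrix_alt lines
instance (lines : List String) (out : List (List Int)) : Decidable (Spec_createNewMatrix lines out) := by unfold Spec_createNewMatrix; infer_instance

-- ===== CLAIM (what is proved, stated in full; the proofs are below) =====
def Claim_equal_createNewMatrix : Prop := ∀ (lines : List String), Dom_createNewMatrix lines → Pre_createNewMatrix lines → Spec_createNewMatrix lines (createNewMatrix lines)

-- ===== LEMMAS AND PROOFS =====

-- replace.go with old = " ", new = "" removes exactly the spaces
theorem replace_go_space (fuel : Nat) (l acc : List Char) (h : l.length ≤ fuel) :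
    PySem.Chars.replace.go [' '] [] fuel l acc = acc.reverse ++ l.filter (fun c => c != ' ') := by
  induction fuel generalizing l acc with
  | zero =>
    have : l = [] := List.eq_nil_of_length_eq_zero (Nat.le_zero.mp h)
    subst this; simp [PySem.Chars.replace.go]
  | succ n ih =>
    cases l with
    | nil => simp [PySem.Chars.replace.go]
    | cons c t =>
      by_cases hc : c = ' '
      · subst hc
        rw [show PySem.Chars.replace.go [' '] [] (n+1) (' ' :: t) acc
              = PySem.Chars.replace.go [' '] [] n t acc by
            simp [PySem.Chars.replace.go, List.isPrefixOf]]
        rw [ih t acc (by simpa using Nat.le_of_succ_le_succ h)]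
        simp
      · rw [show PySem.Chars.replace.go [' '] [] (n+1) (c :: t) acc
              = PySem.Chars.replace.go [' '] [] n t (c :: acc) by
            simp only [PySem.Chars.replace.go, List.isPrefixOf]
            rw [if_neg]
            simp
            exact fun h' => absurd h'.symm hc]
        rw [ih t (c :: acc) (by simpa using Nat.le_of_succ_le_succ h)]
        simp [hc]

theorem replace_space_eq_filter (s : String) :
    (PySem.Str.replace s " " "").toList = s.toList.filter (fun c => c != ' ') := by
  rw [PySem.Str.toList_replace]
  show PySem.Chars.replace s.toList [' '] [] = _
  rw [PySem.Chars.replace]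
  simp only [List.isEmpty_cons, if_neg Bool.false_ne_true]
  exact replace_go_space _ _ _ (le_refl _)

-- A's index-based adjacent scan equals B's zip-based adjacent scan
theorem rangeAll_eq_zipAll (f : Int → Int → Bool) (l : List Int) :
    ((List.range (l.length - 1)).all fun i => f (l.getD i 0) (l.getD (i + 1) 0))
      = ((l.zip (l.drop 1)).all fun p => f p.1 p.2) := by
  induction l with
  | nil => simp
  | cons a t ih =>
    cases t with
    | nil => simp
    | cons b u =>
      have hlen : (a :: b :: u).length - 1 = ((b :: u).length - 1) + 1 := by simp
      rw [hlen, List.range_succ_eq_map]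
      simp only [List.all_cons, List.all_map]
      rw [show ((fun i => f ((a :: b :: u).getD i 0) ((a :: b :: u).getD (i + 1) 0)) ∘ Nat.succ)
            = (fun i => f ((b :: u).getD i 0) ((b :: u).getD (i + 1) 0)) from by
          funext i; rfl]
      rw [ih]
      simp [List.getD]

-- the zip-based scan is exactly IsChain
theorem zipAll_iff_isChain (R : Int → Int → Prop) [DecidableRel R] (l : List Int) :
    (((l.zip (l.drop 1)).all fun p => decide (R p.1 p.2)) = true) ↔ List.IsChain R l := by
  induction l with
  | nil => simp
  | cons a t ih =>
    cases t with
    | nil => simp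
    | cons b u =>
      simp only [List.drop_succ_cons, List.drop_zero, List.zip_cons_cons, List.all_cons,
        Bool.and_eq_true, decide_eq_true_eq, List.isChain_cons_cons]
      rw [← ih]
      simp

theorem sorted_of_nondecr (l : List Int)
    (h : ((l.zip (l.drop 1)).all fun p => decide (p.1 ≤ p.2)) = true) :
    PySem.List.sorted l (fun x => x) false = l :=
  PySem.List.sorted_eq_self_of_pairwise l (fun x => x)
    (((zipAll_iff_isChain (· ≤ ·) l).mp h).pairwise)

theorem sorted_of_nonincr (l : List Int)
    (h : ((l.zip (l.drop 1)).all fun p => decide (p.1 ≥ p.2)) = true) :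
    PySem.List.sorted l (fun x => x) false = l.reverse :=
  PySem.List.sorted_id_eq_of_perm_of_pairwise l l.reverse l.reverse_perm
    (List.pairwise_reverse.mpr (((zipAll_iff_isChain (· ≥ ·) l).mp h).pairwise))

-- per-line step equality
theorem step_eq (acc : List (List Int)) (line : String) :
    (let newLines := PySem.Str.replace line " " ""
     let lineInLines := newLines.toList.foldl (fun a c => a ++ [(PySem.Int.ofChars? [c]).getD 0]) []
     if verifyOrder lineInLines then acc ++ [PySem.List.sorted lineInLines (fun x => x) false]
     else acc)
    = (let nums := (line.toList.filter (fun ch => ch != ' ')).map (fun ch => (PySem.Int.ofChars? [ch]).getD 0)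
       if (nums.zip (nums.drop 1)).all (fun p => decide (p.1 ≤ p.2)) then acc ++ [nums]
       else if (nums.zip (nums.drop 1)).all (fun p => decide (p.1 ≥ p.2)) then acc ++ [nums.reverse]
       else acc) := by
  simp only []
  rw [replace_space_eq_filter, PySem.List.foldl_append_singleton_eq_map]
  simp only [List.nil_append]
  set nums := (line.toList.filter (fun ch => ch != ' ')).map (fun ch => (PySem.Int.ofChars? [ch]).getD 0) with hnums
  have hA : verifyOrder nums
      = (((nums.zip (nums.drop 1)).all fun p => decide (p.1 ≤ p.2))
          || ((nums.zip (nums.drop 1)).all fun p => decide (p.1 ≥ p.2))) := by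
    unfold verifyOrder
    rw [rangeAll_eq_zipAll (fun x y => decide (x ≤ y)) nums,
        rangeAll_eq_zipAll (fun x y => decide (x ≥ y)) nums]
    cases h : (((nums.zip (nums.drop 1)).all fun p => decide (p.1 ≤ p.2))
        || ((nums.zip (nums.drop 1)).all fun p => decide (p.1 ≥ p.2))) <;> simp
  rw [hA]
  by_cases hnd : ((nums.zip (nums.drop 1)).all fun p => decide (p.1 ≤ p.2)) = true
  · rw [if_pos (by rw [hnd, Bool.true_or]), if_pos hnd, sorted_of_nondecr nums hnd]
  · by_cases hni : ((nums.zip (nums.drop 1)).all fun p => decide (p.1 ≥ p.2)) = true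
    · rw [if_pos (by rw [hni, Bool.or_true]), if_neg hnd, if_pos hni, sorted_of_nonincr nums hni]
    · rw [if_neg (by rw [Bool.or_eq_true]; exact fun h => h.elim hnd hni), if_neg hnd, if_neg hni]

-- ===== VERDICT (by name: the statement is the Claim_ definition above) =====
theorem createNewMatrix_spec : Claim_equal_createNewMatrix := by
  intro lines _ _
  unfold Spec_createNewMatrix createNewMatrix createNewMatrix_alt
  exact List.foldl_ext _ _ [] (fun acc line _ => step_eq acc line)
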